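-- pv_equiv track=rewrite | github.com/2kom/replica-inpc-mx | tools/canasta_inpc/extraer_pdf.py | _filtrar_ruido
-- ===== SOURCE A (Python) =====
-- _SIDEBAR_INVERTIDO = {
--     "ed", "oiluj", "anecniuq", "adnuges", "esab",
--     "ocigolodotem", "otnemucod", "rodimunsnoc",
--     "laciremoc", "noicubirtsid", "noisimsnart", "noicareneg",
--     "soicerp", "lanoican", "ecidni", ".igeni",
--     # 2010
--     "serodarednop", "erbmeicid", "la", "noc", "ona",
--     ".ocirotsih", ".8002", "hgine",
-- }
--
-- _ENCABEZADOS = (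
--     "Canasta del INPC clasificada",
--     "Anexo C.", "Anexo D.", "Anexo E.", "Anexo F.",
--     "C. Canasta", "D. Canasta",
--     "Concepto Ponderador",
--     "Concepto Ponderación",
--     "Concepto Durabilidad Ponderador",
--     "relativos a la segunda quincena",
--     "dos a la segunda quincena",
-- )
--
-- def _filtrar_ruido(lineas: list[tuple[int, str]]) -> list[tuple[int, str]]:
--     """Paso 2: elimina líneas que no son datos.
--
--     Después de un marcador de fin de datos en una página, todo lo restante
--     de esa página se descarta (sidebar invertido, pie de página).
--     """
--     resultado: list[tuple[int, str]] = []
--     pagina_bloqueada: int | None = None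
--
--     for p, l in lineas:
--         if p != pagina_bloqueada:
--             pagina_bloqueada = None
--
--         if pagina_bloqueada is not None:
--             continue
--
--         if "(Contin" in l or "Total general" in l or l.startswith("Nota:"):
--             pagina_bloqueada = p
--             continue
--
--         if _es_ruido(l):
--             continue
--
--         resultado.append((p, l))
--
--     return resultado
--
-- def _es_ruido(linea: str) -> bool:
--     # Líneas muy cortas (fragmentos de sidebar, puntuación)
--     if len(linea) <= 3:
--         return True
--     # Headers de página
--     if linea.startswith("Documento Metodológico") or linea.startswith("Dooccuummeennttoo"):
--         return True
--     if linea.startswith("Concepto Ponderación") or linea.startswith("CCoonncceeppttoo"):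
--         return True
--     if "ndice" in linea and "onsumidor" in linea and "INEGI" in linea:
--         return True
--     # Encabezados de sección
--     if any(linea.startswith(e) for e in _ENCABEZADOS):
--         return True
--     # Sidebar invertido por nombre
--     if linea.lower() in _SIDEBAR_INVERTIDO:
--         return True
--     # Sidebar invertido por patrón: corto y termina en mayúscula
--     if linea[-1].isupper() and len(linea) < 15 and not linea[0].isdigit():
--         return True
--     return False
-- ===== SOURCE B (Python) =====
-- _SIDEBAR_INVERTIDO = {
--     "ed", "oiluj", "anecniuq", "adnuges", "esab",
--     "ocigolodotem", "otnemucod", "rodimunsnoc",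
--     "laciremoc", "noicubirtsid", "noisimsnart", "noicareneg",
--     "soicerp", "lanoican", "ecidni", ".igeni",
--     "serodarednop", "erbmeicid", "la", "noc", "ona",
--     ".ocirotsih", ".8002", "hgine",
-- }
--
-- # every header/page-banner prefix in one table
-- _PREFIJOS = (
--     "Documento Metodológico", "Dooccuummeennttoo",
--     "Concepto Ponderación", "CCoonncceeppttoo",
--     "Canasta del INPC clasificada",
--     "Anexo C.", "Anexo D.", "Anexo E.", "Anexo F.",
--     "C. Canasta", "D. Canasta",
--     "Concepto Ponderador",
--     "Concepto Ponderación",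
--     "Concepto Durabilidad Ponderador",
--     "relativos a la segunda quincena",
--     "dos a la segunda quincena",
-- )
--
-- def _es_ruido_b(linea: str) -> bool:
--     return (
--         len(linea) <= 3
--         or any(linea.startswith(e) for e in _PREFIJOS)
--         or ("ndice" in linea and "onsumidor" in linea and "INEGI" in linea)
--         or linea.lower() in _SIDEBAR_INVERTIDO
--         or (linea[-1].isupper() and len(linea) < 15 and not linea[0].isdigit())
--     )
--
-- def _filtrar_ruido(lineas: list[tuple[int, str]]) -> list[tuple[int, str]]:
--     """Split into maximal runs of consecutive equal page; within each run keep
--     non-noise lines and drop the run's remainder after an end-of-data marker."""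
--     resultado: list[tuple[int, str]] = []
--     i, n = 0, len(lineas)
--     while i < n:
--         pag = lineas[i][0]
--         j = i
--         while j < n and lineas[j][0] == pag:
--             j += 1
--         for p, l in lineas[i:j]:
--             if "(Contin" in l or "Total general" in l or l.startswith("Nota:"):
--                 break
--             if not _es_ruido_b(l):
--                 resultado.append((p, l))
--         i = j
--     return resultado
-- ===== Notes on version B (the rewrite author's own statement) =====
-- stated objective: alternative
-- what changed: Replaces the single stateful pass with a pagina_bloqueada flag by splitting the input into maximal runs of consecutive equal page numbers and processing each run independently (keep non-noise lines, drop the run's remainder after an end-of-data marker); the noise predicate is folded into one boolean with a single prefix table instead of an early-return chain.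
import Mathlib
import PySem

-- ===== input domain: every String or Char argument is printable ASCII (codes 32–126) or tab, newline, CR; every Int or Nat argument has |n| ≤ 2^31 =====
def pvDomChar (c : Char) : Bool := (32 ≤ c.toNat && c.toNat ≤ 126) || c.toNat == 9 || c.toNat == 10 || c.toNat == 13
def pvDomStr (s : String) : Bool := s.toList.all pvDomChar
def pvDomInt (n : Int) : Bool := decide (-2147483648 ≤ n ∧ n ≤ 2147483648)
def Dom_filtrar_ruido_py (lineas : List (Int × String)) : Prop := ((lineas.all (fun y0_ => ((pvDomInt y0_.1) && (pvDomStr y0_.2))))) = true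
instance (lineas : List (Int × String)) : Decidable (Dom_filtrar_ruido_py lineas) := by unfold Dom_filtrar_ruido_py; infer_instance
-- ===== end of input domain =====

-- B regroups the single stateful pass into per-page runs (objective: alternative decomposition, same cost).

-- ===== PORT A =====
def pvSidebar : PySem.Set String := PySem.Set.ofList
  ["ed", "oiluj", "anecniuq", "adnuges", "esab",
   "ocigolodotem", "otnemucod", "rodimunsnoc",
   "laciremoc", "noicubirtsid", "noisimsnart", "noicareneg",
   "soicerp", "lanoican", "ecidni", ".igeni",
   "serodarednop", "erbmeicid", "la", "noc", "ona",
   ".ocirotsih", ".8002", "hgine"]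

def pvEncabezados : List String :=
  ["Canasta del INPC clasificada",
   "Anexo C.", "Anexo D.", "Anexo E.", "Anexo F.",
   "C. Canasta", "D. Canasta",
   "Concepto Ponderador",
   "Concepto Ponderación",
   "Concepto Durabilidad Ponderador",
   "relativos a la segunda quincena",
   "dos a la segunda quincena"]

-- linea[-1].isupper() / linea[0].isdigit(): both only reached with len > 3 (first branch),
-- so the Option from Python's indexing is always some; `.elim false` is exact there.
def es_ruido (linea : String) : Bool :=
  if PySem.Str.len linea ≤ 3 then true
  else if PySem.Str.startswith linea "Documento Metodológico" || PySem.Str.startswith linea "Dooccuummeennttoo" then true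
  else if PySem.Str.startswith linea "Concepto Ponderación" || PySem.Str.startswith linea "CCoonncceeppttoo" then true
  else if PySem.Str.isIn "ndice" linea && PySem.Str.isIn "onsumidor" linea && PySem.Str.isIn "INEGI" linea then true
  else if pvEncabezados.any (fun e => PySem.Str.startswith linea e) then true
  else if pvSidebar.contains (PySem.Str.lower linea) then true
  else if ((PySem.Str.pyGet? linea (-1)).elim false PySem.Chars.isupper)
          && PySem.Str.len linea < 15
          && !((PySem.Str.pyGet? linea 0).elim false PySem.Chars.isdigit) then true
  else false

def pvMarcador (l : String) : Bool :=
  PySem.Str.isIn "(Contin" l || PySem.Str.isIn "Total general" l || PySem.Str.startswith l "Nota:"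

def filtrar_ruido_py (lineas : List (Int × String)) : List (Int × String) :=
  (lineas.foldl
    (fun (st : List (Int × String) × Option Int) pl =>
      let res := st.1
      let bloq0 := st.2
      let p := pl.1
      let l := pl.2
      -- if p != pagina_bloqueada: pagina_bloqueada = None
      let bloq := if bloq0 = some p then bloq0 else none
      if bloq.isSome then (res, bloq)
      else if pvMarcador l then (res, some p)
      else if es_ruido l then (res, bloq)
      else (res ++ [(p, l)], bloq))
    ([], none)).1

-- ===== PORT B =====
-- all header/banner prefixes in one table
def pvPrefijos : List String :=
  ["Documento Metodológico", "Dooccuummeennttoo",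
   "Concepto Ponderación", "CCoonncceeppttoo"] ++ pvEncabezados

def es_ruido_b (linea : String) : Bool :=
  PySem.Str.len linea ≤ 3
  || pvPrefijos.any (fun e => PySem.Str.startswith linea e)
  || (PySem.Str.isIn "ndice" linea && PySem.Str.isIn "onsumidor" linea && PySem.Str.isIn "INEGI" linea)
  || pvSidebar.contains (PySem.Str.lower linea)
  || (((PySem.Str.pyGet? linea (-1)).elim false PySem.Chars.isupper)
      && PySem.Str.len linea < 15
      && !((PySem.Str.pyGet? linea 0).elim false PySem.Chars.isdigit))

-- one run of consecutive lines of the same page: keep non-noise lines, stop at a marker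
def pvProcRun : List (Int × String) → List (Int × String)
  | [] => []
  | (p, l) :: t =>
      if pvMarcador l then []
      else if es_ruido_b l then pvProcRun t
      else (p, l) :: pvProcRun t

-- split into maximal runs of consecutive equal page (the two index scans of Source B)
def pvRuns : List (Int × String) → List (List (Int × String))
  | [] => []
  | (p, l) :: t =>
      ((p, l) :: t.takeWhile (fun x => x.1 == p)) :: pvRuns (t.dropWhile (fun x => x.1 == p))
  termination_by xs => xs.length
  decreasing_by
    simpa using Nat.lt_succ_of_le (List.length_dropWhile_le (fun x => x.1 == p) t)

def filtrar_ruido_py_alt (lineas : List (Int × String)) : List (Int × String) :=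
  (pvRuns lineas).flatMap pvProcRun

-- ===== PRECONDITION & SPEC =====
def Spec_filtrar_ruido_py (lineas : List (Int × String)) (out : List (Int × String)) : Prop := out = filtrar_ruido_py_alt lineas
instance (lineas : List (Int × String)) (out : List (Int × String)) : Decidable (Spec_filtrar_ruido_py lineas out) := by unfold Spec_filtrar_ruido_py; infer_instance

-- ===== CLAIM (what is proved, stated in full; the proofs are below) =====
def Claim_equal_filtrar_ruido_py : Prop := ∀ (lineas : List (Int × String)), Dom_filtrar_ruido_py lineas → Spec_filtrar_ruido_py lineas (filtrar_ruido_py lineas)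

-- ===== LEMMAS AND PROOFS =====

-- the two noise predicates agree
theorem es_ruido_eq (l : String) : es_ruido l = es_ruido_b l := by
  unfold es_ruido es_ruido_b pvPrefijos
  rw [Bool.eq_iff_iff]
  simp only [List.any_append, List.any_cons, List.any_nil]
  split_ifs <;> simp_all <;> tauto

-- A's loop, rephrased as the suffix it still appends, given the current blocked page
def pvALoop : Option Int → List (Int × String) → List (Int × String)
  | _, [] => []
  | bloq0, (p, l) :: t =>
      let bloq := if bloq0 = some p then bloq0 else none
      if bloq.isSome then pvALoop bloq t
      else if pvMarcador l then pvALoop (some p) t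
      else if es_ruido l then pvALoop bloq t
      else (p, l) :: pvALoop bloq t

theorem foldl_eq_aLoop (xs : List (Int × String)) : ∀ (res : List (Int × String)) (b : Option Int),
    (xs.foldl
      (fun (st : List (Int × String) × Option Int) pl =>
        let res := st.1
        let bloq0 := st.2
        let p := pl.1
        let l := pl.2
        let bloq := if bloq0 = some p then bloq0 else none
        if bloq.isSome then (res, bloq)
        else if pvMarcador l then (res, some p)
        else if es_ruido l then (res, bloq)
        else (res ++ [(p, l)], bloq))
      (res, b)).1 = res ++ pvALoop b xs := by
  induction xs with
  | nil => intro res b; simp [pvALoop]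
  | cons hd t ih =>
    intro res b
    obtain ⟨p, l⟩ := hd
    by_cases hb : b = some p
    · subst hb
      simp only [List.foldl_cons]
      simp only [pvALoop]
      simp [ih]
    · simp only [List.foldl_cons]
      simp only [pvALoop]
      by_cases hm : pvMarcador l
      · simp [hb, hm, ih]
      · by_cases hr : es_ruido l
        · simp [hb, hm, hr, ih]
        · simp [hb, hm, hr, ih]

-- while blocked on page p, lines of page p are skipped
theorem aLoop_blocked (p : Int) : ∀ (ys rest : List (Int × String)),
    (∀ x ∈ ys, x.1 = p) → pvALoop (some p) (ys ++ rest) = pvALoop (some p) rest := by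
  intro ys
  induction ys with
  | nil => intro rest _; rfl
  | cons hd t ih =>
    intro rest hall
    obtain ⟨q, l⟩ := hd
    have hq : q = p := by simpa using hall (q, l) (by simp)
    rw [List.cons_append, hq]
    have hstep : pvALoop (some p) ((p, l) :: (t ++ rest)) = pvALoop (some p) (t ++ rest) := by
      simp [pvALoop]
    rw [hstep]
    exact ih rest (fun x hx => hall x (List.mem_cons_of_mem _ hx))

-- at a page change (or the end) the block is cleared
theorem aLoop_unblock (p : Int) (rest : List (Int × String))
    (h : rest = [] ∨ ∀ hne : rest ≠ [], (rest.head hne).1 ≠ p) :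
    pvALoop (some p) rest = pvALoop none rest := by
  cases rest with
  | nil => rfl
  | cons hd t =>
    obtain ⟨q, l⟩ := hd
    have hq : q ≠ p := by
      rcases h with h | h
      · simp at h
      · simpa using h (by simp)
    have hpq : ¬ (some p = some q) := by
      intro h'
      exact hq (Option.some.inj h').symm
    simp only [pvALoop]
    simp [hpq]

-- one whole run of page p is processed like pvProcRun
theorem aLoop_run (p : Int) : ∀ (ys rest : List (Int × String)),
    (∀ x ∈ ys, x.1 = p) →
    (rest = [] ∨ ∀ hne : rest ≠ [], (rest.head hne).1 ≠ p) →
    pvALoop none (ys ++ rest) = pvProcRun ys ++ pvALoop none rest := by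
  intro ys
  induction ys with
  | nil => intro rest _ _; simp [pvProcRun]
  | cons hd t ih =>
    intro rest hall hrest
    obtain ⟨q, l⟩ := hd
    have hq : q = p := by simpa using hall (q, l) (by simp)
    have htall : ∀ x ∈ t, x.1 = p := fun x hx => hall x (List.mem_cons_of_mem _ hx)
    rw [List.cons_append, hq]
    by_cases hm : pvMarcador l
    · have h1 : pvALoop none ((p, l) :: (t ++ rest)) = pvALoop (some p) (t ++ rest) := by
        simp [pvALoop, hm]
      rw [h1, aLoop_blocked p t rest htall, aLoop_unblock p rest hrest, pvProcRun]
      simp [hm]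
    · by_cases hr : es_ruido_b l
      · have h1 : pvALoop none ((p, l) :: (t ++ rest)) = pvALoop none (t ++ rest) := by
          simp [pvALoop, hm, es_ruido_eq, hr]
        rw [h1, ih rest htall hrest, pvProcRun]
        simp [hm, hr]
      · have h1 : pvALoop none ((p, l) :: (t ++ rest)) = (p, l) :: pvALoop none (t ++ rest) := by
          simp [pvALoop, hm, es_ruido_eq, hr]
        rw [h1, ih rest htall hrest, pvProcRun]
        simp [hm, hr]

theorem aLoop_eq_alt (xs : List (Int × String)) :
    pvALoop none xs = (pvRuns xs).flatMap pvProcRun := by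
  induction hn : xs.length using Nat.strong_induction_on generalizing xs with
  | _ n ih =>
    cases xs with
    | nil => simp [pvRuns, pvALoop]
    | cons hd t =>
      obtain ⟨p, l⟩ := hd
      have hsplit : t = t.takeWhile (fun x => x.1 == p) ++ t.dropWhile (fun x => x.1 == p) :=
        (List.takeWhile_append_dropWhile).symm
      have hall : ∀ x ∈ (p, l) :: t.takeWhile (fun x => x.1 == p), x.1 = p := by
        intro x hx
        rcases List.mem_cons.1 hx with h | h
        · simp [h]
        · simpa using List.mem_takeWhile_imp h
      have hrest : (t.dropWhile (fun x => x.1 == p)) = [] ∨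
          ∀ hne : (t.dropWhile (fun x => x.1 == p)) ≠ [],
            ((t.dropWhile (fun x => x.1 == p)).head hne).1 ≠ p := by
        cases hd : t.dropWhile (fun x => x.1 == p) with
        | nil => exact Or.inl rfl
        | cons a s =>
          right
          intro hne
          have := List.head_dropWhile_not (fun x => x.1 == p) (l := t) (by simp [hd])
          simpa [hd] using this
      have hlen : (t.dropWhile (fun x => x.1 == p)).length < n := by
        subst hn
        simpa using Nat.lt_succ_of_le (List.length_dropWhile_le (fun x => x.1 == p) t)
      have key := aLoop_run p ((p, l) :: t.takeWhile (fun x => x.1 == p))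
        (t.dropWhile (fun x => x.1 == p)) hall hrest
      rw [List.cons_append, ← hsplit] at key
      rw [pvRuns]
      simp only [List.flatMap_cons]
      rw [key, ih _ hlen _ rfl]

-- ===== VERDICT (by name: the statement is the Claim_ definition above) =====
theorem filtrar_ruido_py_spec : Claim_equal_filtrar_ruido_py := by
  intro lineas _
  unfold Spec_filtrar_ruido_py filtrar_ruido_py filtrar_ruido_py_alt
  rw [foldl_eq_aLoop lineas [] none, aLoop_eq_alt]
  simp
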